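-- pv_equiv track=rewrite | github.com/puz27/Education | recursions/recursion_examples.py | bigger
-- ===== SOURCE A (Python) =====
-- def bigger(data):
--     if data == []:
--         return 0
--     else:
--         if data[0] > bigger(data[1:]):
--             return data[0]
--         else:
--             return bigger(data[1:])
-- ===== SOURCE B (Python) =====
-- def bigger(data):
--     if data == []:
--         return 0
--     result = 0
--     for x in data:
--         if x > result:
--             result = x
--     return result
-- ===== Notes on version B (the rewrite author's own statement) =====
-- stated objective: faster
-- what changed: Replaced A's double-recursive slice recursion (exponential blow-up from two identical recursive calls) with a single forward pass keeping a running maximum floored at 0.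
import Mathlib
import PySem

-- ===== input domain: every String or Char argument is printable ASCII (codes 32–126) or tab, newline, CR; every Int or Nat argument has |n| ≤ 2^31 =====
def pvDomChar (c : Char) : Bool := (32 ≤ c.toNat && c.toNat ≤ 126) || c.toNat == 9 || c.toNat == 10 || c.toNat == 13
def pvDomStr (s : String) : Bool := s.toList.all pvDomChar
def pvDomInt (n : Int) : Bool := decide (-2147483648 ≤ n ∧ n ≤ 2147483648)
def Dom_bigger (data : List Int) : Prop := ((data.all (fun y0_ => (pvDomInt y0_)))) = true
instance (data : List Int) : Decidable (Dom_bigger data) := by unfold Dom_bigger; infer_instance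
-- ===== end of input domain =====

-- B replaces A's double-recursive slice recursion by one forward pass with a running maximum floored at 0 (measurably faster).
-- ===== PORT A =====
def bigger : List Int → Int
  | [] => 0
  | x :: rest => if x > bigger rest then x else bigger rest

-- ===== PORT B =====
-- the `for x in data` loop with accumulator `result`
def biggerLoop (result : Int) : List Int → Int
  | [] => result
  | x :: xs => biggerLoop (if x > result then x else result) xs

def bigger_alt (data : List Int) : Int :=
  if data = [] then 0
  else biggerLoop 0 data

-- ===== PRECONDITION & SPEC =====
def Spec_bigger (data : List Int) (out : Int) : Prop := out = bigger_alt data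
instance (data : List Int) (out : Int) : Decidable (Spec_bigger data out) := by unfold Spec_bigger; infer_instance

-- ===== CLAIM (what is proved, stated in full; the proofs are below) =====
def Claim_equal_bigger : Prop := ∀ (data : List Int), Dom_bigger data → Spec_bigger data (bigger data)

-- ===== LEMMAS AND PROOFS =====
theorem bigger_nonneg (data : List Int) : 0 ≤ bigger data := by
  induction data with
  | nil => simp [bigger]
  | cons x xs ih => simp only [bigger]; split <;> omega

theorem biggerLoop_eq (data : List Int) : ∀ acc : Int, 0 ≤ acc →
    biggerLoop acc data = if bigger data > acc then bigger data else acc := by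
  induction data with
  | nil => intro acc h; simp [biggerLoop, bigger]; omega
  | cons x xs ih =>
      intro acc h
      simp only [biggerLoop, bigger]
      rw [ih]
      · have := bigger_nonneg xs
        split_ifs <;> omega
      · split <;> omega

-- ===== VERDICT (by name: the statement is the Claim_ definition above) =====
theorem bigger_spec : Claim_equal_bigger := by
  intro data _
  unfold Spec_bigger bigger_alt
  cases data with
  | nil => simp [bigger]
  | cons x xs =>
      rw [biggerLoop_eq _ 0 le_rfl]
      have := bigger_nonneg (x :: xs)
      simp only [reduceCtorEq, if_false]
      omega
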